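-- pv_equiv track=rewrite | github.com/lux-coder/chatbot | ai_service/security/data_masker.py | unmask_for_logging
-- ===== SOURCE A (Python) =====
-- def unmask_for_logging(masked_text: str, original_text: str) -> str:
--     """
--     Create a version for logging that shows mask locations without revealing PII.
--
--     Args:
--         masked_text: Text with PII masked
--         original_text: Original text with PII
--
--     Returns:
--         Text with mask locations marked for logging
--     """
--     differences = []
--     for i, (m, o) in enumerate(zip(masked_text, original_text)):
--         if m != o:
--             if not differences or differences[-1][1] != i - 1:
--                 differences.append([i, i])
--             else:
--                 differences[-1][1] = i
--
--     result = list(masked_text)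
--     for start, end in differences:
--         result[start] = f"[MASKED:{end-start+1}]"
--         result[start+1:end+1] = [""] * (end - start)
--
--     return "".join(result)
-- ===== SOURCE B (Python) =====
-- def unmask_for_logging(masked_text: str, original_text: str) -> str:
--     """
--     Create a version for logging that shows mask locations without revealing PII.
--
--     Single streaming pass: count consecutive differing positions; on a matching
--     character flush the pending run as one token, then append the character.
--     """
--     parts = []
--     run = 0
--     for m, o in zip(masked_text, original_text):
--         if m != o:
--             run += 1
--         else:
--             if run:
--                 parts.append(f"[MASKED:{run}]")
--                 run = 0
--             parts.append(m)
--     if run: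
--         parts.append(f"[MASKED:{run}]")
--     parts.append(masked_text[min(len(masked_text), len(original_text)):])
--     return "".join(parts)
-- ===== Notes on version B (the rewrite author's own statement) =====
-- stated objective: simpler
-- what changed: B replaces A's two-phase algorithm (collect [start,end] runs of differing indices, then splice mask tokens and empty cells into list(masked_text)) with a single streaming pass over zip(masked_text, original_text) that keeps a run counter and emits output parts directly, appending the untouched masked tail at the end.
import Mathlib
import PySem

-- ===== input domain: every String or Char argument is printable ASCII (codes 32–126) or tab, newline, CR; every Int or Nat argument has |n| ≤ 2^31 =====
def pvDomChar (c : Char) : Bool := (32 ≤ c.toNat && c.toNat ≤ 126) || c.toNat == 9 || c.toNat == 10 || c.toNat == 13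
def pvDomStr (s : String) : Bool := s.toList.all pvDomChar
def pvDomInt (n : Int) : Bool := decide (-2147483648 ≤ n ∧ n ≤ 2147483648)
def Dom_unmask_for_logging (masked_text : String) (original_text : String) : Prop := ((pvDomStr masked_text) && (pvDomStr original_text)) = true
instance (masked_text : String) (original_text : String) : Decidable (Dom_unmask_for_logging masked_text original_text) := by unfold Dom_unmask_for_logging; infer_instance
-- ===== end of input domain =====

-- B replaces A's two-phase run-collection + list-splice with one streaming pass
-- keeping a run counter and emitting output parts directly; a timing run
-- measured it as constant-factor faster (no list splicing, one pass).

-- the f"[MASKED:{k}]" token (shared formatting helper of both ports)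
def pvMaskTok (k : Int) : String := "[MASKED:" ++ PySem.Int.toStr k ++ "]"

-- ===== PORT A =====
-- the first loop of A: collect [start, end] runs of differing indices
def pvDiffLoop : List (Int × Char × Char) → List (Int × Int) → List (Int × Int)
  | [], acc => acc
  | (i, m, o) :: rest, acc =>
    if m ≠ o then
      match acc.getLast? with
      | none => pvDiffLoop rest (acc ++ [(i, i)])
      | some (s, e) =>
        if e ≠ i - 1 then pvDiffLoop rest (acc ++ [(i, i)])
        else pvDiffLoop rest (acc.dropLast ++ [(s, i)])
    else pvDiffLoop rest acc

-- one iteration of A's second loop: result[start] = token;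
-- result[start+1:end+1] = [""]*(end-start) replaces the cells start+1..end
-- pointwise (equal lengths), ported as one set per index of that range
def pvApply (res : List String) (p : Int × Int) : List String :=
  let res1 := res.set p.1.toNat (pvMaskTok (p.2 - p.1 + 1))
  (PySem.List.pyRange (p.1 + 1) (p.2 + 1) 1).foldl (fun r j => r.set j.toNat "") res1

def unmask_for_logging (masked_text : String) (original_text : String) : String :=
  let diffs := pvDiffLoop (PySem.List.enumerate (masked_text.toList.zip original_text.toList)) []
  let res := diffs.foldl pvApply (masked_text.toList.map (fun c => String.singleton c))
  PySem.Str.join "" res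

-- ===== PORT B =====
-- B's single streaming pass over zip(masked, original) with a pending-run
-- counter; at the end of the zip it flushes the run and appends the tail
-- masked_text[min(len(masked_text), len(original_text)):] (= the unconsumed
-- masked chars when original ran out first, "" otherwise)
def pvAltGo : List Char → List Char → Int → List String
  | m :: ms, o :: os, run =>
    if m ≠ o then pvAltGo ms os (run + 1)
    else (if run ≠ 0 then [pvMaskTok run] else []) ++ String.singleton m :: pvAltGo ms os 0
  | ms, [], run => (if run ≠ 0 then [pvMaskTok run] else []) ++ [String.ofList ms]
  | [], _ :: _, run => (if run ≠ 0 then [pvMaskTok run] else []) ++ [""]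

def unmask_for_logging_alt (masked_text : String) (original_text : String) : String :=
  PySem.Str.join "" (pvAltGo masked_text.toList original_text.toList 0)

-- ===== PRECONDITION & SPEC =====
def Spec_unmask_for_logging (masked_text : String) (original_text : String) (out : String) : Prop := out = unmask_for_logging_alt masked_text original_text
instance (masked_text : String) (original_text : String) (out : String) : Decidable (Spec_unmask_for_logging masked_text original_text out) := by unfold Spec_unmask_for_logging; infer_instance

-- ===== CLAIM (what is proved, stated in full; the proofs are below) =====
def Claim_equal_unmask_for_logging : Prop := ∀ (masked_text : String) (original_text : String), Dom_unmask_for_logging masked_text original_text → Spec_unmask_for_logging masked_text original_text (unmask_for_logging masked_text original_text)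

-- ===== LEMMAS AND PROOFS =====

-- the maximal runs of differing positions of the zip, starting at index i,
-- written as a forward recursion (pvExt s e ps extends the open run [s, e])
mutual
def pvRuns : Int → List (Char × Char) → List (Int × Int)
  | _, [] => []
  | i, (m, o) :: ps => if m ≠ o then pvExt i i ps else pvRuns (i + 1) ps
def pvExt : Int → Int → List (Char × Char) → List (Int × Int)
  | s, e, [] => [(s, e)]
  | s, e, (m, o) :: ps => if m ≠ o then pvExt s (e + 1) ps else (s, e) :: pvRuns (e + 2) ps
end

-- well-formed run lists: sorted, disjoint, all starts ≥ j
def pvOk : Int → List (Int × Int) → Prop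
  | _, [] => True
  | j, (s, e) :: r => j ≤ s ∧ s ≤ e ∧ pvOk (e + 1) r

def pvShift (k : Int) (r : List (Int × Int)) : List (Int × Int) := r.map (fun p => (p.1 + k, p.2 + k))

def pvF (l : List String) : List Char := (l.map String.toList).flatten

theorem pvOk_mono {j j' : Int} {r : List (Int × Int)} (h : j' ≤ j) (hr : pvOk j r) : pvOk j' r := by
  cases r with
  | nil => trivial
  | cons p r => obtain ⟨h1, h2, h3⟩ := hr; exact ⟨le_trans h h1, h2, h3⟩

theorem pvOk_runs_ext (ps : List (Char × Char)) :
    (∀ i, pvOk i (pvRuns i ps)) ∧ (∀ s e, s ≤ e → pvOk s (pvExt s e ps)) := by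
  induction ps with
  | nil => exact ⟨fun i => trivial, fun s e h => ⟨le_refl s, h, trivial⟩⟩
  | cons mo ps ih =>
    obtain ⟨m, o⟩ := mo
    constructor
    · intro i
      by_cases h : m ≠ o
      · simpa [pvRuns, h] using ih.2 i i (le_refl i)
      · simpa [pvRuns, h] using pvOk_mono (by omega) (ih.1 (i + 1))
    · intro s e hse
      by_cases h : m ≠ o
      · simpa [pvExt, h] using ih.2 s (e + 1) (by omega)
      · exact by simpa [pvExt, h] using ⟨le_refl s, hse, pvOk_mono (by omega) (ih.1 (e + 2))⟩

theorem pvShift_runs_ext (ps : List (Char × Char)) (k : Int) :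
    (∀ i, pvRuns (i + k) ps = pvShift k (pvRuns i ps)) ∧
    (∀ s e, pvExt (s + k) (e + k) ps = pvShift k (pvExt s e ps)) := by
  induction ps with
  | nil => simp [pvRuns, pvExt, pvShift]
  | cons mo ps ih =>
    obtain ⟨m, o⟩ := mo
    constructor
    · intro i
      by_cases h : m ≠ o
      · simpa [pvRuns, h] using ih.2 i i
      · simp only [pvRuns, h, ite_false, not_false_eq_true, not_not, if_neg]
        rw [show i + k + 1 = i + 1 + k by ring]
        exact ih.1 (i + 1)
    · intro s e
      by_cases h : m ≠ o
      · simp only [pvExt, if_pos h]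
        rw [show e + k + 1 = e + 1 + k by ring]
        exact ih.2 s (e + 1)
      · simp only [pvExt, h, ite_false, not_false_eq_true, not_not, if_neg, pvShift, List.map_cons]
        rw [show e + k + 2 = e + 2 + k by ring]
        have := ih.1 (e + 2)
        simp [pvShift] at this
        simp [this]

theorem pvRuns_shift0 (ps : List (Char × Char)) (k : Int) :
    pvRuns k ps = pvShift k (pvRuns 0 ps) := by
  have := (pvShift_runs_ext ps k).1 0
  simpa using this

-- A's first loop computes exactly pvRuns
theorem pvDiffLoop_runs (ps : List (Char × Char)) :
    ∀ i : Int,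
      (∀ acc, (∀ s e, acc.getLast? = some (s, e) → e < i - 1) →
        pvDiffLoop (PySem.List.enumerate ps i) acc = acc ++ pvRuns i ps) ∧
      (∀ acc s, pvDiffLoop (PySem.List.enumerate ps i) (acc ++ [(s, i - 1)]) = acc ++ pvExt s (i - 1) ps) := by
  induction ps with
  | nil =>
    intro i
    refine ⟨fun acc _ => ?_, fun acc s => ?_⟩
    · simp [PySem.List.enumerate, pvDiffLoop, pvRuns]
    · simp [PySem.List.enumerate, pvDiffLoop, pvExt]
  | cons mo ps ih =>
    obtain ⟨m, o⟩ := mo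
    intro i
    constructor
    · intro acc hacc
      rw [PySem.List.enumerate_cons]
      by_cases h : m = o
      · simp only [pvDiffLoop, h, ne_eq, not_true_eq_false, ite_false]
        rw [(ih (i + 1)).1 acc (fun s e hse => by have := hacc s e hse; omega)]
        simp [pvRuns, h]
      · have hbr : pvDiffLoop ((i, m, o) :: PySem.List.enumerate ps (i + 1)) acc =
            pvDiffLoop (PySem.List.enumerate ps (i + 1)) (acc ++ [(i, i)]) := by
          rcases hgl : acc.getLast? with _ | ⟨s, e⟩
          · simp [pvDiffLoop, h, hgl]
          · have : e < i - 1 := hacc s e hgl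
            simp [pvDiffLoop, h, hgl, show e ≠ i - 1 by omega]
        rw [hbr]
        have h2 := (ih (i + 1)).2 acc i
        rw [show i + 1 - 1 = i by ring] at h2
        rw [h2]
        simp [pvRuns, h]
    · intro acc s
      rw [PySem.List.enumerate_cons]
      by_cases h : m = o
      · simp only [pvDiffLoop, h, ne_eq, not_true_eq_false, ite_false]
        rw [(ih (i + 1)).1 (acc ++ [(s, i - 1)]) (fun s' e' hse' => by
          rw [List.getLast?_concat] at hse'
          simp only [Option.some.injEq, Prod.mk.injEq] at hse'
          omega)]
        simp [pvExt, h, show i - 1 + 2 = i + 1 by ring]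
      · have hred : pvDiffLoop ((i, m, o) :: PySem.List.enumerate ps (i + 1)) (acc ++ [(s, i - 1)]) =
            pvDiffLoop (PySem.List.enumerate ps (i + 1)) (acc ++ [(s, i)]) := by
          simp [pvDiffLoop, h, List.getLast?_concat, List.dropLast_concat]
        rw [hred]
        have h2 := (ih (i + 1)).2 acc s
        rw [show i + 1 - 1 = i by ring] at h2
        rw [h2]
        rw [show pvExt s (i - 1) ((m, o) :: ps) = pvExt s (i - 1 + 1) ps from by simp [pvExt, h]]
        rw [show i - 1 + 1 = i by ring]

-- pyRange shifted by one
theorem pvRange_shift1 (a b : Int) :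
    PySem.List.pyRange (a + 1) (b + 1) 1 = (PySem.List.pyRange a b 1).map (· + 1) := by
  induction hn : (b - a).toNat generalizing a b with
  | zero =>
    rw [PySem.List.pyRange_one_eq_nil (by omega : b ≤ a),
        PySem.List.pyRange_one_eq_nil (by omega : b + 1 ≤ a + 1)]
    simp
  | succ n ih =>
    have hab : a < b := by omega
    rw [PySem.List.pyRange_one_cons hab, PySem.List.pyRange_one_cons (by omega : a + 1 < b + 1)]
    simp only [List.map_cons]
    rw [ih (a + 1) b (by omega)]

-- the blanking fold on a shifted index list skips the head cell
theorem pvFoldSet_shift : ∀ (js : List Int), (∀ j ∈ js, 0 ≤ j) → ∀ (x : String) (L : List String),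
    (js.map (· + 1)).foldl (fun r j => r.set j.toNat "") (x :: L) =
      x :: js.foldl (fun r j => r.set j.toNat "") L
  | [], _, x, L => by simp
  | j :: js, hjs, x, L => by
    have hj : 0 ≤ j := hjs j (by simp)
    simp only [List.map_cons, List.foldl_cons]
    rw [show (j + 1).toNat = j.toNat + 1 by omega]
    rw [show (x :: L).set (j.toNat + 1) "" = x :: L.set j.toNat "" from rfl]
    exact pvFoldSet_shift js (fun j' hj' => hjs j' (by simp [hj'])) x (L.set j.toNat "")

theorem pvApply_cons (x : String) (L : List String) (s e : Int) (hs : 0 ≤ s) (hse : s ≤ e) :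
    pvApply (x :: L) (s + 1, e + 1) = x :: pvApply L (s, e) := by
  simp only [pvApply]
  rw [show e + 1 - (s + 1) + 1 = e - s + 1 by ring]
  rw [show (s + 1).toNat = s.toNat + 1 by omega]
  rw [show (x :: L).set (s.toNat + 1) (pvMaskTok (e - s + 1)) = x :: L.set s.toNat (pvMaskTok (e - s + 1)) from rfl]
  rw [pvRange_shift1 (s + 1) (e + 1)]
  exact pvFoldSet_shift _ (fun j hj => by
    have := (PySem.List.mem_pyRange_one).mp hj
    omega) x _

theorem pvCons_commute : ∀ (R : List (Int × Int)), pvOk 0 R → ∀ (x : String) (L : List String),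
    (pvShift 1 R).foldl pvApply (x :: L) = x :: R.foldl pvApply L
  | [], _, x, L => by simp [pvShift]
  | (s, e) :: R, hok, x, L => by
    obtain ⟨h0, hse, hok'⟩ := hok
    simp only [pvShift, List.map_cons, List.foldl_cons]
    rw [pvApply_cons x L s e h0 hse]
    exact pvCons_commute R (pvOk_mono (by omega) hok') x (pvApply L (s, e))

theorem pvOk_shift : ∀ (R : List (Int × Int)) (j k : Int), pvOk j R → pvOk (j + k) (pvShift k R)
  | [], _, _, _ => trivial
  | (s, e) :: R, j, k, ⟨h1, h2, h3⟩ => by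
    refine ⟨by omega, by omega, ?_⟩
    have := pvOk_shift R (e + 1) k h3
    exact pvOk_mono (by omega) this

theorem pvShift_comp (a b : Int) (R : List (Int × Int)) :
    pvShift a (pvShift b R) = pvShift (b + a) R := by
  simp [pvShift, List.map_map, Function.comp_def]
  intro a1 b1 _
  exact ⟨by ring, by ring⟩

theorem pvPrefix_commute : ∀ (q : List String) (R : List (Int × Int)), pvOk 0 R → ∀ (L : List String),
    (pvShift (q.length : Int) R).foldl pvApply (q ++ L) = q ++ R.foldl pvApply L
  | [], R, hok, L => by
    have : pvShift 0 R = R := by simp [pvShift]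
    simp [this]
  | x :: q, R, hok, L => by
    have hlen : (((x :: q).length : Int)) = (q.length : Int) + 1 := by
      push_cast [List.length_cons]; ring
    rw [hlen, ← pvShift_comp 1 (q.length : Int) R]
    have hok' : pvOk 0 (pvShift (q.length : Int) R) := by
      have := pvOk_shift R 0 (q.length : Int) hok
      exact pvOk_mono (by omega) this
    rw [show (x :: q) ++ L = x :: (q ++ L) from rfl]
    rw [pvCons_commute _ hok' x (q ++ L)]
    rw [pvPrefix_commute q R hok L]
    rfl

-- blanking cells 1..p.length of x :: p ++ L
theorem pvBlank : ∀ (p : List String) (x : String) (L : List String),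
    (PySem.List.pyRange 1 (1 + (p.length : Int)) 1).foldl (fun r j => r.set j.toNat "") (x :: (p ++ L)) =
      x :: List.replicate p.length "" ++ L
  | [], x, L => by
    rw [PySem.List.pyRange_one_eq_nil (by simp)]
    simp
  | y :: p, x, L => by
    have h1 : (1 : Int) + (((y :: p).length : Int)) = (1 + (p.length : Int)) + 1 := by
      push_cast [List.length_cons]; ring
    rw [h1, PySem.List.pyRange_one_cons (by push_cast; omega)]
    simp only [List.foldl_cons]
    rw [show ((1 : Int)).toNat = 1 from rfl]
    rw [show (x :: ((y :: p) ++ L)).set 1 "" = x :: ("" :: (p ++ L)) from rfl]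
    rw [show (1 : Int) + 1 = 1 + 1 from rfl]
    rw [pvRange_shift1 1 (1 + (p.length : Int))]
    rw [pvFoldSet_shift _ (fun j hj => by
      have := (PySem.List.mem_pyRange_one).mp hj
      omega) x ("" :: (p ++ L))]
    rw [pvBlank p "" L]
    simp [List.replicate_succ]

theorem pvApply_head (p0 : String) (p L : List String) :
    pvApply (p0 :: (p ++ L)) (0, (p.length : Int)) =
      pvMaskTok ((p.length : Int) + 1) :: List.replicate p.length "" ++ L := by
  simp only [pvApply]
  rw [show ((p.length : Int) - 0 + 1) = (p.length : Int) + 1 by ring]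
  rw [show ((0 : Int)).toNat = 0 from rfl]
  rw [show (p0 :: (p ++ L)).set 0 (pvMaskTok ((p.length : Int) + 1)) = pvMaskTok ((p.length : Int) + 1) :: (p ++ L) from rfl]
  rw [show (0 : Int) + 1 = 1 from rfl]
  rw [show (p.length : Int) + 1 = 1 + (p.length : Int) by ring]
  exact pvBlank p _ L

theorem pvChars_join_nil (l : List (List Char)) : PySem.Chars.join [] l = l.flatten := by
  induction l with
  | nil => simp [PySem.Chars.join_nil]
  | cons x xs ih =>
    cases xs with
    | nil => simp [PySem.Chars.join_singleton]
    | cons y ys => simp [PySem.Chars.join_cons_cons, ih]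

theorem pvJoin_flatten (l : List String) : (PySem.Str.join "" l).toList = pvF l := by
  rw [PySem.Str.toList_join]
  simpa [pvF] using pvChars_join_nil (l.map String.toList)

theorem pvF_append (a b : List String) : pvF (a ++ b) = pvF a ++ pvF b := by
  simp [pvF]

theorem pvF_singletons (cs : List Char) : pvF (cs.map (fun c => String.singleton c)) = cs := by
  induction cs with
  | nil => simp [pvF]
  | cons c cs ih =>
    simp only [List.map_cons, pvF, List.flatten_cons, String.toList_singleton, List.map_map] at *
    simp [Function.comp_def] at *
    simp [ih]

theorem pvFlatten_singleton : ∀ (cs : List Char), (cs.map (fun c => [c])).flatten = cs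
  | [] => by simp
  | c :: cs => by simp [pvFlatten_singleton cs]

-- the two statements of the central induction, for a given ms, os pair
def pvM (ms os : List Char) : Prop :=
  pvF ((pvRuns 0 (ms.zip os)).foldl pvApply (ms.map (fun c => String.singleton c))) =
    pvF (pvAltGo ms os 0)

def pvE (ms os : List Char) : Prop :=
  ∀ (p : List String), 1 ≤ p.length →
    pvF ((pvExt 0 ((p.length : Int) - 1) (ms.zip os)).foldl pvApply (p ++ ms.map (fun c => String.singleton c))) =
      pvF (pvAltGo ms os (p.length : Int))

theorem pvMain_msnil (os : List Char) : pvM [] os ∧ pvE [] os := by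
  constructor
  · cases os <;> simp [pvM, pvRuns, pvAltGo, pvF]
  · intro p hp
    obtain ⟨p0, p', rfl⟩ : ∃ p0 p', p = p0 :: p' := by
      cases p with
      | nil => simp at hp
      | cons a b => exact ⟨a, b, rfl⟩
    have hc : (((p0 :: p').length : Int)) - 1 = ((p'.length : Int)) := by
      push_cast [List.length_cons]; ring
    rw [hc]
    rw [show (p0 :: p') ++ ([] : List Char).map (fun c => String.singleton c) = p0 :: (p' ++ []) by simp]
    rw [show ([] : List Char).zip os = [] from rfl]
    simp only [pvExt, List.foldl_cons, List.foldl_nil]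
    rw [pvApply_head p0 p' []]
    have hL : (((p0 :: p').length : Int)) ≠ 0 := by push_cast [List.length_cons]; omega
    have hL2 : ((p'.length : Int)) + 1 ≠ 0 := by omega
    cases os with
    | nil =>
      simp [pvAltGo, hL, hL2, pvF, pvF_append, hc, pvFlatten_singleton]
    | cons o os' =>
      simp [pvAltGo, hL, hL2, pvF, pvF_append, hc, pvFlatten_singleton]

theorem pvMain_osnil (ms : List Char) : pvM ms [] ∧ pvE ms [] := by
  constructor
  · unfold pvM
    rw [show (ms.zip ([] : List Char)) = [] from by simp]
    rw [show pvAltGo ms [] 0 = [String.ofList ms] from by simp [pvAltGo]]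
    simp only [pvRuns, List.foldl_nil]
    rw [pvF_singletons]
    simp [pvF]
  · intro p hp
    obtain ⟨p0, p', rfl⟩ : ∃ p0 p', p = p0 :: p' := by
      cases p with
      | nil => simp at hp
      | cons a b => exact ⟨a, b, rfl⟩
    have hc : (((p0 :: p').length : Int)) - 1 = ((p'.length : Int)) := by
      push_cast [List.length_cons]; ring
    rw [hc]
    rw [show (p0 :: p') ++ ms.map (fun c => String.singleton c) = p0 :: (p' ++ ms.map (fun c => String.singleton c)) by simp]
    simp only [List.zip_nil_right, pvExt, List.foldl_cons, List.foldl_nil]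
    rw [pvApply_head p0 p' (ms.map (fun c => String.singleton c))]
    have hL : (((p0 :: p').length : Int)) ≠ 0 := by push_cast [List.length_cons]; omega
    have hL2 : ((p'.length : Int)) + 1 ≠ 0 := by omega
    simp [pvAltGo, hL, hL2, pvF, hc, Function.comp_def, pvFlatten_singleton]

-- the central induction: A's splice of the runs equals B's streamed parts
theorem pvMain : ∀ (n : Nat) (ms : List Char), ms.length ≤ n → ∀ (os : List Char),
    pvM ms os ∧ pvE ms os := by
  intro n
  induction n with
  | zero =>
    intro ms hlen os
    have : ms = [] := List.eq_nil_of_length_eq_zero (by omega)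
    subst this
    exact pvMain_msnil os
  | succ n ih =>
    intro ms hlen os
    cases ms with
    | nil => exact pvMain_msnil os
    | cons m ms' =>
      cases os with
      | nil => exact pvMain_osnil (m :: ms')
      | cons o os' =>
        have hlen' : ms'.length ≤ n := by simpa using Nat.le_of_succ_le_succ (by simpa using hlen)
        have ihM := (ih ms' hlen' os').1
        have ihE := (ih ms' hlen' os').2
        have hok0 : pvOk 0 (pvRuns 0 (ms'.zip os')) := (pvOk_runs_ext (ms'.zip os')).1 0
        constructor
        · -- pvM
          unfold pvM
          rw [List.zip_cons_cons]
          by_cases h : m = o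
          · subst h
            rw [show pvRuns 0 ((m, m) :: ms'.zip os') = pvRuns 1 (ms'.zip os') from by simp [pvRuns]]
            rw [pvRuns_shift0 (ms'.zip os') 1]
            rw [List.map_cons]
            rw [pvCons_commute _ hok0 _ _]
            rw [show pvAltGo (m :: ms') (m :: os') 0 =
                String.singleton m :: pvAltGo ms' os' 0 from by simp [pvAltGo]]
            simp only [pvF, List.map_cons, List.flatten_cons]
            have := ihM
            unfold pvM at this
            simp only [pvF] at this
            rw [this]
          · rw [show pvRuns 0 ((m, o) :: ms'.zip os') = pvExt 0 0 (ms'.zip os') from by simp [pvRuns, h]]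
            have hE1 := ihE [String.singleton m] (by simp)
            simp only [List.length_cons, List.length_nil] at hE1
            rw [show ((((1:Nat)) : Int)) - 1 = 0 from rfl] at hE1
            rw [List.map_cons]
            rw [show String.singleton m :: List.map (fun c => String.singleton c) ms' =
                [String.singleton m] ++ List.map (fun c => String.singleton c) ms' from rfl]
            rw [hE1]
            rw [show pvAltGo (m :: ms') (o :: os') 0 = pvAltGo ms' os' (0 + 1) from by simp [pvAltGo, h]]
            norm_num
        · -- pvE
          intro p hp
          rw [List.zip_cons_cons]
          by_cases h : m = o
          · subst h
            obtain ⟨p0, p', rfl⟩ : ∃ p0 p', p = p0 :: p' := by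
              cases p with
              | nil => simp at hp
              | cons a b => exact ⟨a, b, rfl⟩
            have hc : (((p0 :: p').length : Int)) - 1 = ((p'.length : Int)) := by
              push_cast [List.length_cons]; ring
            rw [hc]
            rw [show pvExt 0 ((p'.length : Int)) ((m, m) :: ms'.zip os') =
                (0, (p'.length : Int)) :: pvRuns ((p'.length : Int) + 2) (ms'.zip os') from by
              simp [pvExt]]
            rw [List.foldl_cons]
            rw [List.map_cons]
            rw [show (p0 :: p') ++ (String.singleton m :: List.map (fun c => String.singleton c) ms') =
                p0 :: (p' ++ (String.singleton m :: List.map (fun c => String.singleton c) ms')) from rfl]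
            rw [pvApply_head p0 p' _]
            rw [show pvMaskTok ((p'.length : Int) + 1) :: List.replicate p'.length "" ++
                  (String.singleton m :: List.map (fun c => String.singleton c) ms') =
                (pvMaskTok ((p'.length : Int) + 1) :: (List.replicate p'.length "" ++ [String.singleton m])) ++
                  List.map (fun c => String.singleton c) ms' from by simp]
            have hqlen : (((pvMaskTok ((p'.length : Int) + 1) :: (List.replicate p'.length "" ++ [String.singleton m])).length : Int)) =
                (p'.length : Int) + 2 := by
              push_cast [List.length_cons, List.length_append, List.length_replicate, List.length_nil]
              ring
            rw [show pvRuns ((p'.length : Int) + 2) (ms'.zip os') =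
                pvShift ((p'.length : Int) + 2) (pvRuns 0 (ms'.zip os')) from pvRuns_shift0 _ _]
            rw [← hqlen]
            rw [pvPrefix_commute _ _ hok0 _]
            have hL : (((p0 :: p').length : Int)) ≠ 0 := by push_cast [List.length_cons]; omega
            have hL2 : ((p'.length : Int)) + 1 ≠ 0 := by omega
            rw [show pvAltGo (m :: ms') (m :: os') (((p0 :: p').length : Int)) =
                pvMaskTok ((p'.length : Int) + 1) :: String.singleton m :: pvAltGo ms' os' 0 from by
              simp [pvAltGo, hL2]]
            have hM2 := ihM
            unfold pvM at hM2
            simp only [pvF, List.map_cons, List.map_append, List.flatten_cons, List.flatten_append] at hM2 ⊢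
            rw [hM2]
            simp
          · rw [show pvExt 0 (((p.length : Int)) - 1) ((m, o) :: ms'.zip os') =
                pvExt 0 (((p.length : Int)) - 1 + 1) (ms'.zip os') from by simp [pvExt, h]]
            have hE1 := ihE (p ++ [String.singleton m]) (by simp)
            have hc : (((p ++ [String.singleton m]).length : Int)) - 1 = ((p.length : Int)) := by
              push_cast [List.length_append, List.length_cons, List.length_nil]; ring
            rw [hc] at hE1
            rw [show ((p.length : Int)) - 1 + 1 = (p.length : Int) by ring]
            rw [List.map_cons]
            rw [show p ++ (String.singleton m :: List.map (fun c => String.singleton c) ms') =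
                (p ++ [String.singleton m]) ++ List.map (fun c => String.singleton c) ms' from by simp]
            rw [hE1]
            rw [show pvAltGo (m :: ms') (o :: os') ((p.length : Int)) =
                pvAltGo ms' os' ((p.length : Int) + 1) from by simp [pvAltGo, h]]
            have hc2 : (((p ++ [String.singleton m]).length : Int)) = (p.length : Int) + 1 := by
              push_cast [List.length_append, List.length_cons, List.length_nil]; ring
            rw [hc2]
-- ===== VERDICT (by name: the statement is the Claim_ definition above) =====
theorem unmask_for_logging_spec : Claim_equal_unmask_for_logging := by
  intro masked original _
  unfold Spec_unmask_for_logging unmask_for_logging unmask_for_logging_alt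
  apply String.ext
  rw [pvJoin_flatten, pvJoin_flatten]
  have hloop := ((pvDiffLoop_runs (masked.toList.zip original.toList) 0).1 [] (by simp)).symm
  simp only [List.nil_append] at hloop
  rw [← hloop] at *
  have hm := (pvMain masked.toList.length masked.toList le_rfl original.toList).1
  unfold pvM at hm
  rw [hloop]
  simpa using hm
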